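-- pv_equiv track=rewrite | github.com/usrname0/ComfyUI-AllergicPack | VaceContextManager/vace_context_manager.py | _find_optimal_window_size
-- ===== SOURCE A (Python) =====
-- def _find_optimal_window_size(desired_size: int, spacing: int, total_frames: int) -> int:
--     """Find window size that best aligns with keyframe spacing."""
--
--     # Try multiples of spacing near the desired size
--     candidates = []
--     for multiplier in range(1, 10):
--         candidate = spacing * multiplier
--         if candidate >= 16:  # Minimum reasonable window size
--             score = abs(candidate - desired_size)
--             candidates.append((candidate, score))
--
--     # Also try the desired size itself
--     candidates.append((desired_size, 0))
--
--     # Choose the candidate with the best score that doesn't exceed total frames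
--     valid_candidates = [(size, score) for size, score in candidates if size <= total_frames]
--
--     if valid_candidates:
--         return min(valid_candidates, key=lambda x: x[1])[0]
--     else:
--         return min(desired_size, total_frames)
-- ===== SOURCE B (Python) =====
-- def _find_optimal_window_size(desired_size: int, spacing: int, total_frames: int) -> int:
--     """Find window size that best aligns with keyframe spacing."""
--     # The desired size itself fits and has perfect score, so it wins outright.
--     if desired_size <= total_frames:
--         return desired_size
--     # Otherwise every admissible multiple of spacing lies below desired_size, so the
--     # closest one is simply the largest that fits: scan descending, first fit wins.
--     for multiplier in range(9, 0, -1):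
--         candidate = spacing * multiplier
--         if 16 <= candidate <= total_frames:
--             return candidate
--     return total_frames
-- ===== Notes on version B (the rewrite author's own statement) =====
-- stated objective: simpler
-- what changed: Drops the score/min machinery entirely: B short-circuits with desired_size when it fits, and otherwise uses the monotonicity insight (all fitting multiples lie below desired_size, so the largest fitting multiple is the closest) to return the first fit of a descending scan, falling back to total_frames.
import Mathlib
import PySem

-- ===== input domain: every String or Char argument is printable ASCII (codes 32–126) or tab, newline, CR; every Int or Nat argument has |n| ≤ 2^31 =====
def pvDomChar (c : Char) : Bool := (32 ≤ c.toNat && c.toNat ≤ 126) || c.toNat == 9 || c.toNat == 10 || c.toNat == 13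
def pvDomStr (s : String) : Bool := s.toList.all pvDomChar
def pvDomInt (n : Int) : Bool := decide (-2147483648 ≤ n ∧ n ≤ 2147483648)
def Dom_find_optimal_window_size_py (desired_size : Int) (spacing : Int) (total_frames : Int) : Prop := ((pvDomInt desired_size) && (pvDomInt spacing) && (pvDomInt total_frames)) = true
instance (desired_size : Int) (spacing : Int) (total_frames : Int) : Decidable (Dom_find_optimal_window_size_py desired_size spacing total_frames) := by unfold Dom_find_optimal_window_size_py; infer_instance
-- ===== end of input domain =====

-- B drops A's score/filter/min pipeline: it returns desired_size outright when it fits,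
-- otherwise the first fit of a descending scan over the multiples (objective: simpler).

-- ===== PORT A =====
def find_optimal_window_size_py (desired_size : Int) (spacing : Int) (total_frames : Int) : Int :=
  -- candidates built by the range(1, 10) loop, appending (candidate, score) when candidate >= 16
  let candidates := (PySem.List.pyRange 1 10 1).foldl
    (fun acc multiplier =>
      let candidate := spacing * multiplier
      if 16 ≤ candidate then acc ++ [(candidate, |candidate - desired_size|)] else acc)
    ([] : List (Int × Int))
  -- candidates.append((desired_size, 0))
  let candidates := candidates ++ [(desired_size, 0)]
  -- valid_candidates = [... if size <= total_frames]
  let valid := candidates.filter (fun p => decide (p.1 ≤ total_frames))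
  -- if valid_candidates: min by score (first minimum), else min(desired_size, total_frames)
  match PySem.List.min? valid (fun p => p.2) with
  | some p => p.1
  | none => min desired_size total_frames

-- ===== PORT B =====
def find_optimal_window_size_py_alt (desired_size : Int) (spacing : Int) (total_frames : Int) : Int :=
  if desired_size ≤ total_frames then desired_size
  else
    -- for multiplier in range(9, 0, -1): return the first candidate with 16 <= candidate <= total_frames
    match (PySem.List.pyRange 9 0 (-1)).findSome?
        (fun multiplier =>
          let candidate := spacing * multiplier
          if 16 ≤ candidate ∧ candidate ≤ total_frames then some candidate else none) with
    | some c => c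
    | none => total_frames

-- ===== PRECONDITION & SPEC =====
def Spec_find_optimal_window_size_py (desired_size : Int) (spacing : Int) (total_frames : Int) (out : Int) : Prop := out = find_optimal_window_size_py_alt desired_size spacing total_frames
instance (desired_size : Int) (spacing : Int) (total_frames : Int) (out : Int) : Decidable (Spec_find_optimal_window_size_py desired_size spacing total_frames out) := by unfold Spec_find_optimal_window_size_py; infer_instance

-- ===== CLAIM (what is proved, stated in full; the proofs are below) =====
def Claim_equal_find_optimal_window_size_py : Prop := ∀ (desired_size : Int) (spacing : Int) (total_frames : Int), Dom_find_optimal_window_size_py desired_size spacing total_frames → Spec_find_optimal_window_size_py desired_size spacing total_frames (find_optimal_window_size_py desired_size spacing total_frames)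

-- ===== LEMMAS AND PROOFS =====

-- A's loop builds exactly the (candidate, score) pairs of the multipliers passing the >= 16 test.
lemma candA_eq (d s : Int) :
    (PySem.List.pyRange 1 10 1).foldl
      (fun acc m => if 16 ≤ s * m then acc ++ [(s * m, |s * m - d|)] else acc)
      ([] : List (Int × Int))
    = ((PySem.List.pyRange 1 10 1).filter (fun m => decide (16 ≤ s * m))).map
        (fun m => (s * m, |s * m - d|)) := by
  simpa using PySem.List.foldl_append_if (fun m => decide (16 ≤ s * m))
    (fun m => (s * m, |s * m - d|)) (PySem.List.pyRange 1 10 1) []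

-- Python's first-minimum min over a list with strictly decreasing keys is the last element.
lemma min?_eq_getLast? (xs : List (Int × Int))
    (hp : xs.Pairwise (fun a c => c.2 < a.2)) :
    PySem.List.min? xs (fun p => p.2) = xs.getLast? := by
  rcases hx : xs.getLast? with _ | l
  · rw [List.getLast?_eq_none_iff] at hx
    subst hx
    rfl
  · obtain ⟨ys, rfl⟩ := List.getLast?_eq_some_iff.mp hx
    rcases hmin : PySem.List.min? (ys ++ [l]) (fun p => p.2) with _ | p
    · exact absurd ((PySem.List.min?_eq_none_iff _ _).mp hmin) (by simp)
    · have hpmem := PySem.List.min?_mem hmin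
      have hple := PySem.List.min?_isMin hmin l (by simp)
      rcases List.mem_append.mp hpmem with hys | hl
      · have hlt := (List.pairwise_append.mp hp).2.2 p hys l (by simp)
        simp only at hple
        omega
      · simpa using hl

-- Python's for-loop with early return over a list is head? of the filtered list.
lemma findSome?_ite {α β : Type} (p : α → Prop) [DecidablePred p] (h : α → β) :
    ∀ l : List α,
      l.findSome? (fun m => if p m then some (h m) else none)
        = ((l.filter (fun m => decide (p m))).head?).map h := by
  intro l
  induction l with
  | nil => rfl
  | cons x t ih =>
    by_cases hx : p x
    · simp [hx]
    · simp [hx, ih]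

lemma AB_eq (d s t : Int) :
    find_optimal_window_size_py d s t = find_optimal_window_size_py_alt d s t := by
  unfold find_optimal_window_size_py find_optimal_window_size_py_alt
  dsimp only
  rw [candA_eq, List.filter_append, List.filter_map, List.filter_filter]
  have hcomp : ((fun p : Int × Int => decide (p.1 ≤ t)) ∘ fun m => (s * m, |s * m - d|))
      = fun m => decide (s * m ≤ t) := by funext m; simp
  rw [hcomp]
  by_cases hd : d ≤ t
  · -- desired_size fits: A's min is forced to an element of score 0, whose size is d
    simp only [List.filter_cons, decide_eq_true_eq, hd, if_pos, List.filter_nil]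
    rcases hmin : PySem.List.min?
        ((((PySem.List.pyRange 1 10 1).filter
            (fun m => decide (s * m ≤ t) && decide (16 ≤ s * m))).map
          (fun m => (s * m, |s * m - d|))) ++ [(d, 0)]) (fun p => p.2) with _ | p
    · exact absurd ((PySem.List.min?_eq_none_iff _ _).mp hmin) (by simp)
    · have hmem := PySem.List.min?_mem hmin
      have hle := PySem.List.min?_isMin hmin (d, 0) (by simp)
      rw [hmin]
      simp only [List.mem_append, List.mem_map, List.mem_singleton] at hmem
      rcases hmem with ⟨m, _, rfl⟩ | rfl
      · show s * m = d
        have h0 : |s * m - d| = 0 := le_antisymm (by simpa using hle) (abs_nonneg _)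
        have := abs_eq_zero.mp h0
        omega
      · rfl
  · -- desired_size does not fit: (d, 0) is filtered out; A takes the minimum-score element of
    -- the fitting multiples, which (scores strictly decreasing) is the last, i.e. the first of
    -- B's descending scan.
    simp only [List.filter_cons, decide_eq_true_eq, hd, if_neg, List.filter_nil,
      List.append_nil, not_false_iff]
    set pred : Int → Bool := fun m => decide (s * m ≤ t) && decide (16 ≤ s * m) with hpred
    set L : List Int := (PySem.List.pyRange 1 10 1).filter pred with hL
    -- every member of L is a multiplier in [1,9] whose candidate fits
    have hmemL : ∀ m ∈ L, 1 ≤ m ∧ m ≤ 9 ∧ s * m ≤ t ∧ 16 ≤ s * m := by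
      intro m hm
      rw [hL, List.mem_filter] at hm
      obtain ⟨hmR, hpm⟩ := hm
      rw [hpred] at hpm
      simp only [Bool.and_eq_true, decide_eq_true_eq] at hpm
      have : (1 : Int) ≤ m ∧ m < 10 := by
        have := hmR
        simp [PySem.List.pyRange] at this
        omega
      exact ⟨this.1, by omega, hpm.1, hpm.2⟩
    -- on L the abs-score is d - candidate
    have hmap : L.map (fun m => (s * m, |s * m - d|)) = L.map (fun m => (s * m, d - s * m)) := by
      apply List.map_congr_left
      intro m hm
      obtain ⟨_, _, hmt, _⟩ := hmemL m hm
      rw [abs_of_nonpos (by omega), neg_sub]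
    rw [hmap]
    -- the scores strictly decrease along L
    have hpL : L.Pairwise (fun a c : Int => a < c) := by
      have : (PySem.List.pyRange 1 10 1).Pairwise (fun a c : Int => a < c) := by decide
      exact this.sublist List.filter_sublist
    have hpw : (L.map (fun m => (s * m, d - s * m))).Pairwise
        (fun a c : Int × Int => c.2 < a.2) := by
      rw [List.pairwise_map]
      refine hpL.imp_of_mem ?_
      intro a b ha hb hab
      obtain ⟨ha1, ha9, _, ha16⟩ := hmemL a ha
      have hs : 0 < s := by
        by_contra hns
        have : s * a ≤ 0 := mul_nonpos_of_nonpos_of_nonneg (by omega) (by omega)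
        omega
      have : s * a < s * b := mul_lt_mul_of_pos_left hab hs
      simp
      omega
    rw [min?_eq_getLast? _ hpw, List.getLast?_eq_head?_reverse, ← List.map_reverse,
      List.head?_map]
    -- B's side: descending scan = head? of the reversed filtered list
    have hrev : PySem.List.pyRange 9 0 (-1) = (PySem.List.pyRange 1 10 1).reverse := by decide
    rw [findSome?_ite (fun m => 16 ≤ s * m ∧ s * m ≤ t) (fun m => s * m), hrev,
      ← List.filter_reverse]
    have hpred' : (fun m => decide (16 ≤ s * m ∧ s * m ≤ t)) = pred := by
      funext m
      by_cases h1 : 16 ≤ s * m <;> by_cases h2 : s * m ≤ t <;> simp [hpred, h1, h2]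
    rw [hpred']
    rcases (List.filter pred (PySem.List.pyRange 1 10 1).reverse).head? with _ | m
    · simp
      omega
    · rfl

-- ===== VERDICT (by name: the statement is the Claim_ definition above) =====
theorem find_optimal_window_size_py_spec : Claim_equal_find_optimal_window_size_py := by
  intro d s t _
  unfold Spec_find_optimal_window_size_py
  exact AB_eq d s t
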